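-- pv_equiv track=rewrite | github.com/circuit-synth/circuit-synth | format_test_output.py | format_sexp
-- ===== SOURCE A (Python) =====
-- def format_sexp(content, indent=0):
--     """Format S-expression with proper indentation."""
--     result = []
--     current_indent = indent
--     i = 0
--
--     while i < len(content):
--         char = content[i]
--
--         if char == '(':
--             # Start of new expression
--             result.append('\n' + '\t' * current_indent + '(')
--             current_indent += 1
--             i += 1
--             # Skip whitespace after opening paren
--             while i < len(content) and content[i] in ' \t\n':
--                 i += 1
--             i -= 1  # Back up one so we process next char normally
--         elif char == ')':
--             # End of expression
--             current_indent -= 1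
--             result.append(')')
--             # Check if there's another closing paren immediately after
--             if i + 1 < len(content) and content[i + 1] == ')':
--                 pass  # Don't add newline
--             else:
--                 pass  # Add newline will be handled by next open paren
--         elif char in ' \t\n':
--             # Whitespace - consolidate to single space
--             if result and result[-1] not in '\n\t':
--                 result.append(' ')
--             # Skip additional whitespace
--             while i + 1 < len(content) and content[i + 1] in ' \t\n':
--                 i += 1
--         else:
--             # Regular character
--             result.append(char)
--
--         i += 1
--
--     return ''.join(result)
-- ===== SOURCE B (Python) =====
-- def format_sexp(content, indent=0):
--     """Format S-expression: tokenize once, then render with an indent counter."""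
--     WS = ' \t\n'
--     n = len(content)
--     tokens = []
--     i = 0
--     while i < n:
--         c = content[i]
--         if c == '(':
--             tokens.append('(')
--             i += 1
--             while i < n and content[i] in WS:
--                 i += 1
--         elif c in WS:
--             tokens.append(' ')
--             while i < n and content[i] in WS:
--                 i += 1
--         else:
--             tokens.append(c)
--             i += 1
--     out = []
--     depth = indent
--     for t in tokens:
--         if t == '(':
--             out.append('\n' + '\t' * depth + '(')
--             depth += 1
--         elif t == ')':
--             depth -= 1
--             out.append(')')
--         elif t == ' ':
--             if out:
--                 out.append(' ')
--         else:
--             out.append(t)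
--     return ''.join(out)
-- ===== Notes on version B (the rewrite author's own statement) =====
-- stated objective: simpler
-- what changed: A's single while-loop with index back-tracking, a lookahead whitespace skip and a substring test on the last appended piece is split into two plain phases: a tokenizer pass emitting paren tokens, one space token per whitespace run (runs following an open paren are consumed by that token) and literal characters, followed by a fold over the token list that maintains only a depth counter and the output pieces, where the space rule reduces to the output being nonempty.
import Mathlib
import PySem

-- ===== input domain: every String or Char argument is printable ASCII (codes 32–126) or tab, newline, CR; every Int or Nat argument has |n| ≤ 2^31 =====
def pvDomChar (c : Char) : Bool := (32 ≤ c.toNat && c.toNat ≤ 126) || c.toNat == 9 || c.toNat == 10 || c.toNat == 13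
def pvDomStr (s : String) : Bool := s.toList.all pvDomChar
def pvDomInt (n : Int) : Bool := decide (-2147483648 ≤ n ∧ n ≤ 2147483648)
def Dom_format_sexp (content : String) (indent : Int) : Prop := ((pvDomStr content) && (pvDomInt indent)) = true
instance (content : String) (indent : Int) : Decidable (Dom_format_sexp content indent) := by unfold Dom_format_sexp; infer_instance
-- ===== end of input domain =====

-- B re-decomposes A's single index-juggling while-loop into a tokenize pass plus a fold over tokens (objective: simpler decomposition, same cost).

-- ===== PORT A =====

-- char in ' \t\n'
def fsIsWs (c : Char) : Bool := c = ' ' || c = '\t' || c = '\n'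

-- '\t' * current_indent  (Python string repetition; the empty string for counts ≤ 0, which Int.toNat makes exact)
def fsTabs (n : Int) : String := String.ofList (List.replicate n.toNat '\t')

-- result[-1] not in '\n\t'  (Python substring membership: the substrings of "\n\t" are exactly "", "\n", "\t", "\n\t" — exact)
def fsNotIn (s : String) : Bool := !(s == "" || s == "\n" || s == "\t" || s == "\n\t")

-- inner loop: while i < len(content) and content[i] in ' \t\n': i += 1
def fsSkipA (cs : List Char) (i : Nat) : Nat :=
  if h : i < cs.length then
    if fsIsWs cs[i] then fsSkipA cs (i + 1) else i
  else i
termination_by cs.length - i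

theorem le_fsSkipA (cs : List Char) (i : Nat) : i ≤ fsSkipA cs i := by
  unfold fsSkipA
  split
  · split
    · exact Nat.le_trans (Nat.le_succ i) (le_fsSkipA cs (i + 1))
    · exact Nat.le_refl i
  · exact Nat.le_refl i
termination_by cs.length - i

-- inner loop: while i + 1 < len(content) and content[i + 1] in ' \t\n': i += 1
def fsSkipA2 (cs : List Char) (i : Nat) : Nat :=
  if h : i + 1 < cs.length then
    if fsIsWs cs[i + 1] then fsSkipA2 cs (i + 1) else i
  else i
termination_by cs.length - i

theorem le_fsSkipA2 (cs : List Char) (i : Nat) : i ≤ fsSkipA2 cs i := by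
  unfold fsSkipA2
  split
  · split
    · exact Nat.le_trans (Nat.le_succ i) (le_fsSkipA2 cs (i + 1))
    · exact Nat.le_refl i
  · exact Nat.le_refl i
termination_by cs.length - i

-- A's main while-loop; in the '(' branch A does i += 1, skips whitespace, i -= 1, then the
-- outer i += 1, which lands exactly on fsSkipA cs (i+1); in the whitespace branch the
-- lookahead skip plus the outer i += 1 lands on fsSkipA2 cs i + 1.
def fsLoopA (cs : List Char) (i : Nat) (ci : Int) (result : List String) : List String :=
  if h : i < cs.length then
    let c := cs[i]
    if c = '(' then
      fsLoopA cs (fsSkipA cs (i + 1)) (ci + 1) (result ++ ["\n" ++ fsTabs ci ++ "("])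
    else if c = ')' then
      fsLoopA cs (i + 1) (ci - 1) (result ++ [")"])
    else if fsIsWs c then
      let result' :=
        match result.getLast? with
        | some last => if fsNotIn last then result ++ [" "] else result
        | none => result
      fsLoopA cs (fsSkipA2 cs i + 1) ci result'
    else
      fsLoopA cs (i + 1) ci (result ++ [String.ofList [c]])
  else result
termination_by cs.length - i
decreasing_by
  · have := le_fsSkipA cs (i + 1); omega
  · omega
  · have := le_fsSkipA2 cs i; omega
  · omega

def format_sexp (content : String) (indent : Int) : String :=
  String.join (fsLoopA content.toList 0 indent [])

-- ===== PORT B =====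

-- c in WS
def fbIsWs (c : Char) : Bool := c = ' ' || c = '\t' || c = '\n'

-- while i < n and content[i] in WS: i += 1
def fbWsEnd (cs : List Char) (i : Nat) : Nat :=
  if h : i < cs.length then
    if fbIsWs cs[i] then fbWsEnd cs (i + 1) else i
  else i
termination_by cs.length - i

theorem le_fbWsEnd (cs : List Char) (i : Nat) : i ≤ fbWsEnd cs i := by
  unfold fbWsEnd
  split
  · split
    · exact Nat.le_trans (Nat.le_succ i) (le_fbWsEnd cs (i + 1))
    · exact Nat.le_refl i
  · exact Nat.le_refl i
termination_by cs.length - i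

theorem lt_fbWsEnd (cs : List Char) (i : Nat) (h : i < cs.length) (hw : fbIsWs cs[i] = true) :
    i + 1 ≤ fbWsEnd cs i := by
  rw [fbWsEnd, dif_pos h, if_pos hw]
  exact le_fbWsEnd cs (i + 1)

-- Phase 1: tokenize; '(' consumes the whitespace after it, a whitespace run becomes one ' ' token
def fbTok (cs : List Char) (i : Nat) : List Char :=
  if h : i < cs.length then
    let c := cs[i]
    if c = '(' then '(' :: fbTok cs (fbWsEnd cs (i + 1))
    else if hw : fbIsWs c then ' ' :: fbTok cs (fbWsEnd cs i)
    else c :: fbTok cs (i + 1)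
  else []
termination_by cs.length - i
decreasing_by
  · have := le_fbWsEnd cs (i + 1); omega
  · have := lt_fbWsEnd cs i h hw; omega
  · omega

-- '\t' * depth  (empty for depth ≤ 0)
def fbTabs (n : Int) : String := String.ofList (List.replicate n.toNat '\t')

-- Phase 2: one fold step of the render loop
def fbStep (st : Int × List String) (t : Char) : Int × List String :=
  if t = '(' then (st.1 + 1, st.2 ++ ["\n" ++ fbTabs st.1 ++ "("])
  else if t = ')' then (st.1 - 1, st.2 ++ [")"])
  else if t = ' ' then (st.1, if st.2.isEmpty then st.2 else st.2 ++ [" "])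
  else (st.1, st.2 ++ [String.ofList [t]])

def format_sexp_alt (content : String) (indent : Int) : String :=
  String.join ((fbTok content.toList 0).foldl fbStep (indent, [])).2

-- ===== PRECONDITION & SPEC =====
def Spec_format_sexp (content : String) (indent : Int) (out : String) : Prop := out = format_sexp_alt content indent
instance (content : String) (indent : Int) (out : String) : Decidable (Spec_format_sexp content indent out) := by unfold Spec_format_sexp; infer_instance

-- ===== CLAIM (what is proved, stated in full; the proofs are below) =====
def Claim_equal_format_sexp : Prop := ∀ (content : String) (indent : Int), Dom_format_sexp content indent → Spec_format_sexp content indent (format_sexp content indent)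

-- ===== LEMMAS AND PROOFS =====

theorem fbIsWs_eq : fbIsWs = fsIsWs := rfl

theorem fbTabs_eq : fbTabs = fsTabs := rfl

theorem fbWsEnd_eq (cs : List Char) (i : Nat) : fbWsEnd cs i = fsSkipA cs i := by
  rw [fbWsEnd, fsSkipA, fbIsWs_eq]
  split
  · split
    · exact fbWsEnd_eq cs (i + 1)
    · rfl
  · rfl
termination_by cs.length - i

-- the two skip loops of A line up: skipping from a whitespace char with the lookahead loop + 1
-- equals the direct skip loop
theorem skip2_eq (cs : List Char) (i : Nat) (h : i < cs.length) (hw : fsIsWs cs[i] = true) :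
    fsSkipA2 cs i + 1 = fsSkipA cs i := by
  rw [fsSkipA, dif_pos h, if_pos hw, fsSkipA2]
  split
  · rename_i h1
    split
    · rename_i hw1
      exact skip2_eq cs (i + 1) h1 hw1
    · rename_i hw1
      rw [fsSkipA, dif_pos h1, if_neg hw1]
  · rename_i h1
    rw [fsSkipA]
    rw [dif_neg h1]
termination_by cs.length - i

-- every piece A ever appends is a nonempty string that is not a substring of "\n\t", so A's
-- 'result and result[-1] not in "\n\t"' test is just 'result is nonempty'
theorem good_paren (d : Int) : fsNotIn ("\n" ++ fsTabs d ++ "(") = true := by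
  have hmem : '(' ∈ ("\n" ++ fsTabs d ++ "(").toList := by simp [fsTabs]
  simp only [fsNotIn, Bool.not_eq_eq_eq_not, Bool.not_true, Bool.or_eq_false_iff]
  refine ⟨⟨⟨?_, ?_⟩, ?_⟩, ?_⟩ <;>
  · rw [beq_eq_false_iff_ne]
    intro hc
    rw [hc] at hmem
    exact absurd hmem (by decide)

theorem good_char (c : Char) (hw : fsIsWs c = false) : fsNotIn (String.ofList [c]) = true := by
  have hn : ("\n" : String).toList = ['\n'] := by decide
  have ht : ("\t" : String).toList = ['\t'] := by decide
  have hnt : ("\n\t" : String).toList = ['\n', '\t'] := by decide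
  have he : ("" : String).toList = [] := by decide
  simp only [fsNotIn, Bool.not_eq_eq_eq_not, Bool.not_true, Bool.or_eq_false_iff]
  refine ⟨⟨⟨?_, ?_⟩, ?_⟩, ?_⟩ <;>
    rw [beq_eq_false_iff_ne, ne_eq, ← String.toList_inj, String.toList_ofList]
  · rw [he]; intro hc; cases hc
  · rw [hn]; intro hc; injection hc with h1 _; subst h1; simp [fsIsWs] at hw
  · rw [ht]; intro hc; injection hc with h1 _; subst h1; simp [fsIsWs] at hw
  · rw [hnt]; intro hc; injection hc with _ h2; cases h2

theorem good_close : fsNotIn ")" = true := by decide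
theorem good_space : fsNotIn " " = true := by decide

theorem stepOpen (st : Int × List String) :
    fbStep st '(' = (st.1 + 1, st.2 ++ ["\n" ++ fbTabs st.1 ++ "("]) := by simp [fbStep]

theorem stepClose (st : Int × List String) :
    fbStep st ')' = (st.1 - 1, st.2 ++ [")"]) := by simp [fbStep]

theorem stepSpace (st : Int × List String) :
    fbStep st ' ' = (st.1, if st.2.isEmpty then st.2 else st.2 ++ [" "]) := by simp [fbStep]

theorem stepChar (st : Int × List String) (c : Char) (h1 : ¬ c = '(') (h2 : ¬ c = ')')
    (h3 : ¬ c = ' ') : fbStep st c = (st.1, st.2 ++ [String.ofList [c]]) := by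
  simp [fbStep, h1, h2, h3]

-- main invariant: A's loop from index i equals folding B's token stream from index i
theorem loop_eq_fold (cs : List Char) (i : Nat) (ci : Int) (res : List String)
    (hinv : ∀ s ∈ res, fsNotIn s = true) :
    fsLoopA cs i ci res = ((fbTok cs i).foldl fbStep (ci, res)).2 := by
  by_cases h : i < cs.length
  · by_cases hp : cs[i] = '('
    · rw [fsLoopA]; rw [dif_pos h, if_pos hp]
      rw [fbTok]; rw [dif_pos h, if_pos hp]
      rw [List.foldl_cons, stepOpen, fbWsEnd_eq, fbTabs_eq]
      exact loop_eq_fold cs (fsSkipA cs (i + 1)) (ci + 1) _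
        (by intro s hs
            rcases List.mem_append.mp hs with h1 | h1
            · exact hinv s h1
            · simp only [List.mem_singleton] at h1; subst h1; exact good_paren ci)
    · by_cases hc : cs[i] = ')'
      · have hw : fsIsWs cs[i] = false := by rw [hc]; decide
        have hw' : fbIsWs cs[i] = false := hw
        rw [fsLoopA]; rw [dif_pos h, if_neg hp, if_pos hc]
        rw [fbTok]; rw [dif_pos h, if_neg hp, dif_neg (by rw [hw']; simp), hc]
        rw [List.foldl_cons, stepClose]
        exact loop_eq_fold cs (i + 1) (ci - 1) _
          (by intro s hs
              rcases List.mem_append.mp hs with h1 | h1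
              · exact hinv s h1
              · simp only [List.mem_singleton] at h1; subst h1; exact good_close)
      · by_cases hw : fsIsWs cs[i] = true
        · rw [fsLoopA]; rw [dif_pos h, if_neg hp, if_neg hc, if_pos hw]
          rw [fbTok]; rw [dif_pos h, if_neg hp, dif_pos (show fbIsWs cs[i] = true from hw)]
          rw [List.foldl_cons, stepSpace, fbWsEnd_eq, skip2_eq cs i h hw]
          have hres : (match res.getLast? with
              | some last => if fsNotIn last = true then res ++ [" "] else res
              | none => res) = (if res.isEmpty then res else res ++ [" "]) := by
            cases hr : res.getLast? with
            | none =>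
              have h0 : res = [] := List.getLast?_eq_none_iff.mp hr
              simp [h0]
            | some last =>
              have hne : res ≠ [] := by
                intro h0; rw [h0] at hr; simp at hr
              have hg : fsNotIn last = true := hinv last (List.mem_of_getLast? hr)
              simp [hg, List.isEmpty_iff, hne]
          rw [hres]
          exact loop_eq_fold cs (fsSkipA cs i) ci _
            (by intro s hs
                split at hs
                · exact hinv s hs
                · rcases List.mem_append.mp hs with h1 | h1
                  · exact hinv s h1
                  · simp only [List.mem_singleton] at h1; subst h1; exact good_space)
        · have hw' : fsIsWs cs[i] = false := by simpa using hw
          rw [fsLoopA]; rw [dif_pos h, if_neg hp, if_neg hc, if_neg hw]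
          rw [fbTok]; rw [dif_pos h, if_neg hp, dif_neg (by rw [show fbIsWs cs[i] = false from hw']; simp)]
          have hsp : ¬ cs[i] = ' ' := by
            intro h0; rw [h0] at hw'; simp [fsIsWs] at hw'
          rw [List.foldl_cons, stepChar _ _ hp hc hsp]
          exact loop_eq_fold cs (i + 1) ci _
            (by intro s hs
                rcases List.mem_append.mp hs with h1 | h1
                · exact hinv s h1
                · simp only [List.mem_singleton] at h1; subst h1; exact good_char _ hw')
  · rw [fsLoopA]; rw [dif_neg h]
    rw [fbTok]; rw [dif_neg h, List.foldl_nil]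
termination_by cs.length - i
decreasing_by
  all_goals first
    | omega
    | (have h1 := le_fsSkipA cs (i + 1); omega)
    | (have h2 := le_fsSkipA2 cs i
       have h3 := skip2_eq cs i h (by assumption)
       omega)

-- ===== VERDICT (by name: the statement is the Claim_ definition above) =====
theorem format_sexp_spec : Claim_equal_format_sexp := by
  intro content indent _
  unfold Spec_format_sexp format_sexp format_sexp_alt
  rw [loop_eq_fold content.toList 0 indent [] (by intro s hs; cases hs)]
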